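-- pv_equiv track=rewrite | github.com/olegJF/Checkio | Storage/Storage_Robot Sort.py | swapsort
-- ===== SOURCE A (Python) =====
-- def swapsort(array):
--     array = list(array)
--     tmp = array[:]
--     if tmp == sorted(array): return ''
--     res = []
--     size = len(tmp)-1
--     while tmp != sorted(array):
--         for i in range(size):
--             if tmp[i]>tmp[i+1]:
--                 tmp[i],tmp[i+1] = tmp[i+1],tmp[i]
--                 res.append(str(i)+str(i+1))
--                 break
--     return ','.join(res)
-- ===== SOURCE B (Python) =====
-- def swapsort(array):
--     # Closed form per element: A's swap sequence is exactly insertion of each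
--     # element j into the sorted prefix, i.e. a descending run of tokens
--     # (j-1,j),(j-2,j-1),...,(j-s,j-s+1) where s = #{i < j : a[i] > a[j]}.
--     # So count inversions per element; no mutation, no re-sorting.
--     a = list(array)
--     parts = []
--     for j in range(1, len(a)):
--         x = a[j]
--         s = sum(1 for v in a[:j] if v > x)
--         parts += [str(k) + str(k + 1) for k in range(j - 1, j - 1 - s, -1)]
--     return ','.join(parts)
-- ===== Notes on version B (the rewrite author's own statement) =====
-- stated objective: faster
-- what changed: Replaces A's simulation loop (re-sorting the array and rescanning for the first adjacent inversion after every single swap) with a closed-form per-element computation: for each j the emitted tokens are the descending run (j-1,j)...(j-s,j-s+1) with s = #{i<j : a[i] > a[j]}, so B just counts per-element inversions and never mutates or sorts anything.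
import Mathlib
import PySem

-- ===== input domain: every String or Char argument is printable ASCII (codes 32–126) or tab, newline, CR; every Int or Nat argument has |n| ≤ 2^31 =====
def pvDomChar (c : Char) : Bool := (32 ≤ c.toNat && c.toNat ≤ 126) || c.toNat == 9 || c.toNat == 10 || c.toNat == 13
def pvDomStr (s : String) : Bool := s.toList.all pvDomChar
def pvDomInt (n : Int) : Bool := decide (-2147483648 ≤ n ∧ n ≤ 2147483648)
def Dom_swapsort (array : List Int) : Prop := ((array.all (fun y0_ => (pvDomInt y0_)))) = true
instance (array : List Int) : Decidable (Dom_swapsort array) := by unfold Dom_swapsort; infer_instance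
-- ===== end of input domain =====

-- B replaces A's simulation loop (re-sort + rescan after every swap) with a closed form:
-- for each position j it emits the descending token run (j-1,j)…(j-s,j-s+1), where
-- s = #{i < j : a[i] > a[j]}; nothing is ever swapped or sorted.  Objective: faster.

-- ===== PORT A =====
-- helpers for A: adjacent swap at k,k+1; the recorded token "str(i)+str(i+1)"
def swapAdj : List Int → Nat → List Int
  | a :: b :: t, 0 => b :: a :: t
  | a :: t, n + 1 => a :: swapAdj t n
  | l, _ => l

def tok (k : Nat) : String := PySem.Int.toStr (Int.ofNat k) ++ PySem.Int.toStr (Int.ofNat k + 1)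

-- number of inversions: termination measure for A's while loop
def invCount : List Int → Nat
  | [] => 0
  | a :: t => t.countP (fun b => decide (b < a)) + invCount t

-- A's inner `for i in range(size): if tmp[i]>tmp[i+1]: … break` = first adjacent inversion
def firstInv : List Int → Option Nat
  | a :: b :: t => if b < a then some 0 else (firstInv (b :: t)).map (· + 1)
  | _ => none

theorem firstInv_spec : ∀ (l : List Int) (i : Nat), firstInv l = some i →
    i + 1 < l.length ∧ l.getD (i + 1) 0 < l.getD i 0 := by
  intro l
  induction l with
  | nil => intro i h; simp [firstInv] at h
  | cons a t ih =>
    intro i h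
    cases t with
    | nil => simp [firstInv] at h
    | cons b t' =>
      by_cases hba : b < a
      · simp [firstInv, hba] at h
        subst h; simpa using hba
      · simp [firstInv, hba] at h
        obtain ⟨j, hj, hji⟩ := h
        obtain ⟨h1, h2⟩ := ih j hj
        subst hji
        constructor
        · simpa using h1
        · simpa using h2

theorem swapAdj_perm : ∀ (k : Nat) (l : List Int), (swapAdj l k).Perm l := by
  intro k
  induction k with
  | zero =>
    intro l
    match l with
    | [] => simp [swapAdj]
    | [a] => simp [swapAdj]
    | a :: b :: t => exact List.Perm.swap a b t
  | succ n ih =>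
    intro l
    match l with
    | [] => simp [swapAdj]
    | a :: t => simpa [swapAdj] using List.Perm.cons a (ih t)

theorem invCount_swap_lt : ∀ (k : Nat) (l : List Int), k + 1 < l.length →
    l.getD (k + 1) 0 < l.getD k 0 → invCount (swapAdj l k) < invCount l := by
  intro k
  induction k with
  | zero =>
    intro l hlen hlt
    match l with
    | [] => simp at hlen
    | [a] => simp at hlen
    | a :: b :: t =>
      simp at hlt
      have hab : ¬ a < b := not_lt.mpr (le_of_lt hlt)
      simp [swapAdj, invCount, hlt, hab]
      omega
  | succ n ih =>
    intro l hlen hlt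
    match l with
    | [] => simp at hlen
    | a :: t =>
      have h1 : n + 1 < t.length := by simpa using hlen
      have h2 : t.getD (n + 1) 0 < t.getD n 0 := by simpa using hlt
      have := ih t h1 h2
      simp [swapAdj, invCount, (swapAdj_perm n t).countP_eq]
      omega

-- A's while loop: repeat { find first inversion, swap it, record } until tmp == sorted(array)
def loopA (target : List Int) (tmp : List Int) (res : List String) : List String :=
  if tmp = target then res
  else
    match h : firstInv tmp with
    | none => res   -- unreachable in A (tmp is a permutation of target); guard for totality
    | some i => loopA target (swapAdj tmp i) (res ++ [tok i])
termination_by invCount tmp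
decreasing_by
  obtain ⟨h1, h2⟩ := firstInv_spec tmp i h
  exact invCount_swap_lt i tmp h1 h2

def swapsort (array : List Int) : String :=
  if array = PySem.List.sorted array (fun x => x) false then ""
  else PySem.Str.join "," (loopA (PySem.List.sorted array (fun x => x) false) array [])

-- ===== PORT B =====
-- transliteration of Source B: for j in range(1, len(a)): s = sum(1 for v in a[:j] if v > a[j]);
-- parts += [str(k)+str(k+1) for k in range(j-1, j-1-s, -1)].
-- `a[j]` is always in range here, ported as getD; the descending range(j-1, j-1-s, -1)
-- is exactly (range' (j-s) s).reverse (s ≤ j since s counts among j elements).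
def swapsort_alt (array : List Int) : String :=
  let parts := (List.range' 1 (array.length - 1)).foldl
    (fun parts j =>
      let x := array.getD j 0
      let s := (array.take j).countP (fun v => decide (x < v))
      parts ++ (List.range' (j - s) s).reverse.map
        (fun k => PySem.Int.toStr (Int.ofNat k) ++ PySem.Int.toStr (Int.ofNat k + 1)))
    []
  PySem.Str.join "," parts

-- ===== PRECONDITION & SPEC =====
def Spec_swapsort (array : List Int) (out : String) : Prop := out = swapsort_alt array
instance (array : List Int) (out : String) : Decidable (Spec_swapsort array out) := by unfold Spec_swapsort; infer_instance

-- ===== CLAIM (what is proved, stated in full; the proofs are below) =====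
def Claim_equal_swapsort : Prop := ∀ (array : List Int), Dom_swapsort array → Spec_swapsort array (swapsort array)

-- ===== LEMMAS AND PROOFS =====

-- canonical swap sequence: tokens of repeated first-inversion swaps
def canon (l : List Int) : List String :=
  match h : firstInv l with
  | none => []
  | some i => tok i :: canon (swapAdj l i)
termination_by invCount l
decreasing_by
  obtain ⟨h1, h2⟩ := firstInv_spec l i h
  exact invCount_swap_lt i l h1 h2

theorem canon_of_none {l : List Int} (h : firstInv l = none) : canon l = [] := by
  rw [canon]; split <;> simp_all

theorem canon_of_some {l : List Int} {i : Nat} (h : firstInv l = some i) :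
    canon l = tok i :: canon (swapAdj l i) := by
  rw [canon]; split <;> simp_all

theorem loopA_of_some {target tmp : List Int} {res : List String} {i : Nat}
    (hne : tmp ≠ target) (h : firstInv tmp = some i) :
    loopA target tmp res = loopA target (swapAdj tmp i) (res ++ [tok i]) := by
  rw [loopA, if_neg hne]; split <;> simp_all

theorem firstInv_none_iff : ∀ (l : List Int), firstInv l = none ↔ l.IsChain (· ≤ ·) := by
  intro l
  induction l with
  | nil => simp [firstInv]
  | cons a t ih =>
    cases t with
    | nil => simp [firstInv]
    | cons b t' =>
      by_cases hba : b < a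
      · simp [firstInv, hba, List.isChain_cons_cons]
      · have hab : a ≤ b := not_lt.mp hba
        simp [firstInv, hba, List.isChain_cons_cons, ih, hab]

theorem sorted_unique {tmp target : List Int} (hp : tmp.Perm target)
    (ht : target.Pairwise (· ≤ ·)) (hs : tmp.Pairwise (· ≤ ·)) : tmp = target :=
  List.Perm.eq_of_pairwise (fun a b _ _ h1 h2 => le_antisymm h1 h2) hs ht hp

theorem loopA_eq_canon (target : List Int) (ht : target.Pairwise (· ≤ ·)) :
    ∀ (n : Nat) (tmp : List Int) (res : List String), invCount tmp ≤ n → tmp.Perm target →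
      loopA target tmp res = res ++ canon tmp := by
  intro n
  induction n with
  | zero =>
    intro tmp res hn hperm
    have hnone : firstInv tmp = none := by
      cases hfi : firstInv tmp with
      | none => rfl
      | some i =>
        obtain ⟨h1, h2⟩ := firstInv_spec tmp i hfi
        have := invCount_swap_lt i tmp h1 h2
        omega
    have hsorted : tmp = target :=
      sorted_unique hperm ht (List.isChain_iff_pairwise.mp ((firstInv_none_iff tmp).mp hnone))
    rw [loopA, if_pos hsorted, canon_of_none hnone, List.append_nil]
  | succ m ih =>
    intro tmp res hn hperm
    by_cases heq : tmp = target
    · have hnone : firstInv tmp = none := by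
        rw [firstInv_none_iff, heq]
        exact List.isChain_iff_pairwise.mpr ht
      rw [loopA, if_pos heq, canon_of_none hnone, List.append_nil]
    · cases hfi : firstInv tmp with
      | none =>
        exact absurd (sorted_unique hperm ht
          (List.isChain_iff_pairwise.mp ((firstInv_none_iff tmp).mp hfi))) heq
      | some i =>
        obtain ⟨h1, h2⟩ := firstInv_spec tmp i hfi
        have hlt := invCount_swap_lt i tmp h1 h2
        rw [loopA_of_some heq hfi,
          ih (swapAdj tmp i) (res ++ [tok i]) (by omega) ((swapAdj_perm i tmp).trans hperm),
          canon_of_some hfi]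
        simp

-- ===== B-side lemmas: canon has the closed form B computes =====

-- the first inversion of C ++ b :: x :: r with sorted C ++ [b] and x < b is at |C|
theorem firstInv_split : ∀ (C : List Int) (b x : Int) (r : List Int),
    (C ++ [b]).Pairwise (· ≤ ·) → x < b → firstInv (C ++ b :: x :: r) = some C.length := by
  intro C
  induction C with
  | nil => intro b x r _ hx; simp [firstInv, hx]
  | cons c C ih =>
    intro b x r hp hx
    have hp' : (C ++ [b]).Pairwise (· ≤ ·) := (List.pairwise_cons.mp hp).2
    have hrec := ih b x r hp' hx
    cases C with
    | nil =>
      have hcb : c ≤ b := by simpa using (List.pairwise_cons.mp hp).1 b (by simp)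
      simp [firstInv, not_lt.mpr hcb, hx]
    | cons c' C' =>
      have hcc' : c ≤ c' := (List.pairwise_cons.mp hp).1 c' (by simp)
      simp only [List.cons_append, firstInv, not_lt.mpr hcc']
      rw [List.cons_append] at hrec
      simp [hrec]

theorem swapAdj_split : ∀ (C : List Int) (b x : Int) (r : List Int),
    swapAdj (C ++ b :: x :: r) C.length = C ++ x :: b :: r := by
  intro C b x r
  induction C with
  | nil => simp [swapAdj]
  | cons c C ih => simp [swapAdj, ih]

-- bubbling x left past the all-greater suffix v of the sorted prefix u ++ v
theorem insert_canon : ∀ (v u : List Int) (x : Int) (r : List Int),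
    (u ++ v).Pairwise (· ≤ ·) → (∀ y ∈ v, x < y) →
    canon (u ++ v ++ x :: r)
      = (List.range' u.length v.length).reverse.map tok ++ canon (u ++ x :: (v ++ r)) := by
  intro v
  induction v using List.reverseRecOn with
  | nil => intro u x r _ _; simp
  | append_singleton w b ih =>
    intro u x r hp hall
    have hxb : x < b := hall b (by simp)
    have hw : ∀ y ∈ w, x < y := fun y hy => hall y (by simp [hy])
    have hp1 : ((u ++ w) ++ [b]).Pairwise (· ≤ ·) := by
      simpa [List.append_assoc] using hp
    have hpw : (u ++ w).Pairwise (· ≤ ·) :=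
      List.Pairwise.sublist (List.sublist_append_left _ _) hp1
    have hfi : firstInv ((u ++ w) ++ b :: x :: r) = some (u ++ w).length :=
      firstInv_split _ b x r hp1 hxb
    have heq : u ++ (w ++ [b]) ++ x :: r = (u ++ w) ++ b :: x :: r := by
      simp [List.append_assoc]
    rw [heq, canon_of_some hfi, swapAdj_split]
    have hih := ih u x (b :: r) hpw hw
    have heq2 : (u ++ w) ++ x :: b :: r = u ++ w ++ x :: (b :: r) := by
      simp [List.append_assoc]
    rw [heq2, hih]
    simp only [List.length_append, List.length_cons, List.length_nil]
    rw [List.range'_1_concat]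
    simp [List.append_assoc]

-- a sorted list splits into its ≤x part followed by its >x part
theorem sorted_split : ∀ (p : List Int) (x : Int), p.Pairwise (· ≤ ·) →
    p = p.filter (fun y => decide (y ≤ x)) ++ p.filter (fun y => decide (x < y)) := by
  intro p x
  induction p with
  | nil => simp
  | cons a t ih =>
    intro hp
    obtain ⟨ha, ht⟩ := List.pairwise_cons.mp hp
    by_cases hax : a ≤ x
    · simpa [List.filter_cons, hax, not_lt.mpr hax] using ih ht
    · have hxa : x < a := not_le.mp hax
      have h1 : t.filter (fun y => decide (y ≤ x)) = [] := by
        rw [List.filter_eq_nil_iff]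
        intro y hy
        simp
        exact lt_of_lt_of_le hxa (ha y hy)
      have h2 : t.filter (fun y => decide (x < y)) = t := by
        rw [List.filter_eq_self]
        intro y hy
        simpa using lt_of_lt_of_le hxa (ha y hy)
      simp [hax, hxa, h1, h2]

theorem canon_of_pairwise {l : List Int} (h : l.Pairwise (· ≤ ·)) : canon l = [] :=
  canon_of_none ((firstInv_none_iff l).mpr (List.isChain_iff_pairwise.mpr h))

def cntGT (a : List Int) (i : Nat) : Nat :=
  (a.take i).countP (fun v => decide (a.getD i 0 < v))

theorem canon_closed_form : ∀ (m : Nat) (a : List Int) (j : Nat), a.length - j ≤ m →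
    j ≤ a.length →
    canon (List.insertionSort (· ≤ ·) (a.take j) ++ a.drop j)
      = ((List.range' j (a.length - j)).map
          (fun i => (List.range' (i - cntGT a i) (cntGT a i)).reverse.map tok)).flatten := by
  intro m
  induction m with
  | zero =>
    intro a j hm hj
    have hjl : j = a.length := by omega
    rw [hjl]
    simp [canon_of_pairwise (List.pairwise_insertionSort _ _)]
  | succ m ih =>
    intro a j hm hj
    by_cases hjl : j = a.length
    · rw [hjl]
      simp [canon_of_pairwise (List.pairwise_insertionSort _ _)]
    · have hjlt : j < a.length := by omega
      have hps : (List.insertionSort (· ≤ ·) (a.take j)).Pairwise (· ≤ ·) :=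
        List.pairwise_insertionSort _ _
      have hpp : (List.insertionSort (· ≤ ·) (a.take j)).Perm (a.take j) :=
        List.perm_insertionSort _ _
      have hx : a.drop j = a.getD j 0 :: a.drop (j + 1) := by
        rw [List.drop_eq_getElem_cons hjlt, List.getD_eq_getElem a 0 hjlt]
      have hsplit := sorted_split (List.insertionSort (· ≤ ·) (a.take j)) (a.getD j 0) hps
      set x := a.getD j 0 with hxdef
      set u := (List.insertionSort (· ≤ ·) (a.take j)).filter (fun y => decide (y ≤ x)) with hu
      set v := (List.insertionSort (· ≤ ·) (a.take j)).filter (fun y => decide (x < y)) with hvv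
      have hv : ∀ y ∈ v, x < y := by
        intro y hy; simpa using (List.mem_filter.mp hy).2
      have huv : (u ++ v).Pairwise (· ≤ ·) := hsplit ▸ hps
      have hvlen : v.length = cntGT a j := by
        rw [hvv, ← List.countP_eq_length_filter, hpp.countP_eq]
        rfl
      have hplen : (List.insertionSort (· ≤ ·) (a.take j)).length = j := by
        rw [hpp.length_eq, List.length_take]; omega
      have hulen : u.length = j - cntGT a j := by
        have := congrArg List.length hsplit
        simp [List.length_append] at this
        omega
      have htake : a.take (j + 1) = a.take j ++ [x] := by
        rw [hxdef, List.getD_eq_getElem a 0 hjlt]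
        exact List.take_succ_eq_append_getElem hjlt
      have hsort2 : (u ++ x :: v).Pairwise (· ≤ ·) := by
        rw [List.pairwise_append]
        obtain ⟨pu, pv, cross⟩ := List.pairwise_append.mp huv
        refine ⟨pu, ?_, ?_⟩
        · rw [List.pairwise_cons]
          exact ⟨fun y hy => le_of_lt (hv y hy), pv⟩
        · intro y hy z hz
          rcases List.mem_cons.mp hz with rfl | hz'
          · simpa using (List.mem_filter.mp hy).2
          · exact cross y hy z hz'
      have hperm2 : (u ++ x :: v).Perm (List.insertionSort (· ≤ ·) (a.take (j + 1))) := by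
        refine List.Perm.trans List.perm_middle ?_
        refine List.Perm.trans ?_ (List.perm_insertionSort _ _).symm
        rw [htake]
        refine List.Perm.trans ?_ (List.perm_append_singleton x (a.take j)).symm
        exact List.Perm.cons x (hsplit ▸ hpp)
      have hins : u ++ x :: v = List.insertionSort (· ≤ ·) (a.take (j + 1)) :=
        sorted_unique hperm2 (List.pairwise_insertionSort _ _) hsort2
      calc canon (List.insertionSort (· ≤ ·) (a.take j) ++ a.drop j)
          = canon (u ++ v ++ x :: a.drop (j + 1)) := by rw [hx, hsplit]
        _ = (List.range' u.length v.length).reverse.map tok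
              ++ canon (u ++ x :: (v ++ a.drop (j + 1))) := insert_canon v u x _ huv hv
        _ = (List.range' (j - cntGT a j) (cntGT a j)).reverse.map tok
              ++ canon (List.insertionSort (· ≤ ·) (a.take (j + 1)) ++ a.drop (j + 1)) := by
              rw [hulen, hvlen, ← hins]; simp [List.append_assoc]
        _ = _ := by
              rw [ih a (j + 1) (by omega) (by omega)]
              have hlen : a.length - j = (a.length - (j + 1)) + 1 := by omega
              rw [hlen, List.range'_succ]
              simp

theorem canon_eq_parts (array : List Int) :
    canon array = (List.range' 1 (array.length - 1)).flatMap
      (fun i => (List.range' (i - cntGT array i) (cntGT array i)).reverse.map tok) := by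
  have h0 := canon_closed_form array.length array 0 (by omega) (by omega)
  simp only [List.take_zero, List.insertionSort_nil, List.drop_zero, Nat.sub_zero,
    List.nil_append] at h0
  rw [h0, List.flatMap_def]
  cases hn : array.length with
  | zero => simp
  | succ k =>
    rw [List.range'_succ]
    have : cntGT array 0 = 0 := by simp [cntGT]
    simp [this]

-- ===== VERDICT (by name: the statement is the Claim_ definition above) =====
theorem swapsort_spec : Claim_equal_swapsort := by
  unfold Claim_equal_swapsort
  intro array _
  unfold Spec_swapsort swapsort swapsort_alt
  have hparts : (List.range' 1 (array.length - 1)).foldl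
      (fun parts j =>
        parts ++ (List.range' (j - (array.take j).countP (fun v => decide (array.getD j 0 < v)))
            ((array.take j).countP (fun v => decide (array.getD j 0 < v)))).reverse.map
          (fun k => PySem.Int.toStr (Int.ofNat k) ++ PySem.Int.toStr (Int.ofNat k + 1))) []
      = canon array := by
    rw [PySem.List.foldl_append_eq_flatMap, canon_eq_parts,
      show tok = fun k => PySem.Int.toStr (Int.ofNat k) ++ PySem.Int.toStr (Int.ofNat k + 1)
        from rfl]
    simp [cntGT, List.map_reverse]
  have h1 : (PySem.List.sorted array (fun x => x) false).Pairwise (· ≤ ·) := by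
    simpa using PySem.List.sorted_pairwise (xs := array) (key := fun x => x)
  by_cases heq : array = PySem.List.sorted array (fun x => x) false
  · rw [if_pos heq]
    have hpw : array.Pairwise (· ≤ ·) := by rw [heq]; exact h1
    rw [show canon array = [] from canon_of_pairwise hpw] at hparts
    rw [hparts]
    rfl
  · rw [if_neg heq]
    have hperm : array.Perm (PySem.List.sorted array (fun x => x) false) :=
      (PySem.List.sorted_perm (xs := array) (key := fun x => x) (rev := false)).symm
    rw [loopA_eq_canon _ h1 (invCount array) array [] le_rfl hperm, hparts]
    simp
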